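-- pv_equiv track=rewrite | github.com/jovisly/AdventOfCode | day_04/part2.py | get_dict_generator
-- ===== SOURCE A (Python) =====
-- def get_dict_generator(dict_won_cards):
--     """Returns a dictionary that specifies the cards that can generate each card.
--
--     Returns: e.g., {1: [], 2: [1], 3: [1, 2], 4: [1, 2, 3], 5: [1, 3, 4], 6: []}
--     """
--     dict_generators = {}
--     for card_num in list(dict_won_cards):
--         dict_generators[card_num] = []
--         for k, cards in dict_won_cards.items():
--             if card_num in cards:
--                 dict_generators[card_num].append(k)
--
--     return dict_generators
-- ===== SOURCE B (Python) =====
-- def get_dict_generator(dict_won_cards):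
--     """Single-pass inversion: for each key k, record k as a generator of every
--     distinct card in its list that is itself a key."""
--     inverse = {card_num: [] for card_num in dict_won_cards}
--     for k, cards in dict_won_cards.items():
--         for c in dict.fromkeys(cards):
--             if c in inverse:
--                 inverse[c].append(k)
--     return inverse
-- ===== Notes on version B (the rewrite author's own statement) =====
-- stated objective: faster
-- what changed: A rescans the whole dict for every key (for each key, test membership in every card list); B makes one pass, initialising every key's inverse list and appending k to inverse[c] for each distinct card c of each key k.
import Mathlib
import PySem

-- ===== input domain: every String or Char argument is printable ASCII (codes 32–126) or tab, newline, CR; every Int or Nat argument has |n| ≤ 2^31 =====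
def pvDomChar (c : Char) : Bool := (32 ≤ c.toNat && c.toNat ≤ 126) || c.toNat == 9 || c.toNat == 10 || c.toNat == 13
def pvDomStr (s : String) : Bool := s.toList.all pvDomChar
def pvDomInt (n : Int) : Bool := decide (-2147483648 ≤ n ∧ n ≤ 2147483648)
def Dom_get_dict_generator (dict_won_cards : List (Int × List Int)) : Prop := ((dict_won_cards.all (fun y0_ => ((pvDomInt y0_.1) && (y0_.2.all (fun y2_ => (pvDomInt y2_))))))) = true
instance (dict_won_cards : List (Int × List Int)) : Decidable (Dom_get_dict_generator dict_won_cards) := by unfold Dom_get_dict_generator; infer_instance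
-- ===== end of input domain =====

-- B replaces A's key-by-key rescans of the whole dict (O(N·E)) with one pass that, for each
-- key k, appends k to the inverse list of every distinct card in its list (O(N+E)).

-- ===== PORT A =====
def get_dict_generator (dict_won_cards : List (Int × List Int)) : List (Int × List Int) :=
  -- for card_num in list(dict_won_cards): dict_generators[card_num] = [];
  --   for k, cards in dict_won_cards.items(): if card_num in cards: dict_generators[card_num].append(k)
  ((dict_won_cards.map (fun kv => kv.1)).foldl
    (fun dg card =>
      dict_won_cards.foldl
        (fun dg kc =>
          if card ∈ kc.2 then dg.modify card [] (fun g => g ++ [kc.1]) else dg)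
        (dg.insert card ([] : List Int)))
    (PySem.Dict.empty : PySem.Dict Int (List Int))).items

-- ===== PORT B =====
def get_dict_generator_alt (dict_won_cards : List (Int × List Int)) : List (Int × List Int) :=
  -- inverse = {card_num: [] for card_num in dict_won_cards}
  let inv0 : PySem.Dict Int (List Int) :=
    PySem.Dict.ofList (dict_won_cards.map (fun kv => (kv.1, ([] : List Int))))
  -- for k, cards in dict_won_cards.items(): for c in dict.fromkeys(cards): if c in inverse: inverse[c].append(k)
  (dict_won_cards.foldl
    (fun inv kc =>
      (PySem.List.dedup kc.2).foldl
        (fun inv c =>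
          if inv.contains c then inv.modify c [] (fun g => g ++ [kc.1]) else inv)
        inv)
    inv0).items

-- ===== PRECONDITION & SPEC =====
-- The Python argument is a dict, whose keys are necessarily distinct; Pre_ states exactly that
-- for the association-list encoding (a list with duplicate keys encodes no Python input).
def Pre_get_dict_generator (dict_won_cards : List (Int × List Int)) : Prop :=
  (dict_won_cards.map (fun kv => kv.1)).Nodup
instance (dict_won_cards : List (Int × List Int)) : Decidable (Pre_get_dict_generator dict_won_cards) := by unfold Pre_get_dict_generator; infer_instance

def pvWitness_get_dict_generator : (List (Int × List Int)) := [(1, []), (2, [1]), (3, [1, 2])]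

def Spec_get_dict_generator (dict_won_cards : List (Int × List Int)) (out : List (Int × List Int)) : Prop := out = get_dict_generator_alt dict_won_cards
instance (dict_won_cards : List (Int × List Int)) (out : List (Int × List Int)) : Decidable (Spec_get_dict_generator dict_won_cards out) := by unfold Spec_get_dict_generator; infer_instance

-- ===== CLAIM (what is proved, stated in full; the proofs are below) =====
def Claim_equal_get_dict_generator : Prop := ∀ (dict_won_cards : List (Int × List Int)), Dom_get_dict_generator dict_won_cards → Pre_get_dict_generator dict_won_cards → Spec_get_dict_generator dict_won_cards (get_dict_generator dict_won_cards)

-- ===== LEMMAS AND PROOFS =====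

-- the common value: the keys of all entries whose card list mentions c, in dict order
def pvGens (d : List (Int × List Int)) (c : Int) : List Int :=
  ((d.filter (fun kc => decide (c ∈ kc.2))).map (fun kc => kc.1))

-- A's inner loop over the whole dict only ever touches key `card`
theorem pvA_inner (l : List (Int × List Int)) (card : Int) (dg : PySem.Dict Int (List Int))
    (v : List Int) :
    l.foldl (fun dg kc => if card ∈ kc.2 then dg.modify card [] (fun g => g ++ [kc.1]) else dg)
      (dg.insert card v)
    = dg.insert card (v ++ (l.filter (fun kc => decide (card ∈ kc.2))).map (fun kc => kc.1)) := by
  induction l generalizing v with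
  | nil => simp
  | cons kc t ih =>
    simp only [List.foldl_cons]
    by_cases h : card ∈ kc.2
    · rw [if_pos h]
      have hm : (dg.insert card v).modify card [] (fun g => g ++ [kc.1])
          = dg.insert card (v ++ [kc.1]) := by
        simp [PySem.Dict.modify, PySem.Dict.getD_insert_self, PySem.Dict.insert_insert_self]
      rw [hm, ih]
      simp [h]
    · rw [if_neg h, ih]
      simp [h]

theorem pvA_items (d : List (Int × List Int))
    (hnd : (d.map (fun kv => kv.1)).Nodup) :
    get_dict_generator d = d.map (fun kv => (kv.1, pvGens d kv.1)) := by
  unfold get_dict_generator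
  have hstep :
      (fun (dg : PySem.Dict Int (List Int)) card =>
        d.foldl (fun dg kc => if card ∈ kc.2 then dg.modify card [] (fun g => g ++ [kc.1]) else dg)
          (dg.insert card ([] : List Int)))
      = (fun (dg : PySem.Dict Int (List Int)) card => dg.insert card (pvGens d card)) := by
    funext dg card
    rw [pvA_inner]
    simp [pvGens]
  rw [hstep,
    PySem.Dict.items_foldl_insert_fresh (d.map (fun kv => kv.1)) (fun c => c) (pvGens d)
      PySem.Dict.empty (by intro a _; exact PySem.Dict.contains_empty a) (by simpa using hnd)]
  simp [PySem.Dict.empty, Function.comp_def]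

-- B's guarded modify loops never change the key list
theorem pvB_keys_inner (cs : List Int) (k : Int) (inv : PySem.Dict Int (List Int)) :
    (cs.foldl (fun inv c =>
        if inv.contains c then inv.modify c [] (fun g => g ++ [k]) else inv) inv).keys
    = inv.keys := by
  induction cs generalizing inv with
  | nil => rfl
  | cons c t ih =>
    simp only [List.foldl_cons]
    by_cases hc : inv.contains c = true
    · rw [if_pos hc, ih, PySem.Dict.keys_modify, PySem.Dict.keys_insert_of_contains _ _ hc]
    · rw [if_neg hc, ih]

theorem pvB_keys_outer (l : List (Int × List Int)) (inv : PySem.Dict Int (List Int)) :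
    (l.foldl (fun inv kc =>
        (PySem.List.dedup kc.2).foldl (fun inv c =>
          if inv.contains c then inv.modify c [] (fun g => g ++ [kc.1]) else inv) inv) inv).keys
    = inv.keys := by
  induction l generalizing inv with
  | nil => rfl
  | cons kc t ih => simp only [List.foldl_cons]; rw [ih, pvB_keys_inner]

-- one inner pass appends k to the value at c exactly when c occurs in cs (cs duplicate-free)
theorem pvB_getD_inner (cs : List Int) (k c : Int) (inv : PySem.Dict Int (List Int))
    (hc : inv.contains c = true) (hnd : cs.Nodup) :
    (cs.foldl (fun inv c' =>
        if inv.contains c' then inv.modify c' [] (fun g => g ++ [k]) else inv) inv).getD c []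
    = inv.getD c [] ++ (if c ∈ cs then [k] else []) := by
  induction cs generalizing inv with
  | nil => simp
  | cons a t ih =>
    simp only [List.foldl_cons]
    by_cases hac : a = c
    · subst hac
      rw [if_pos hc]
      have hnotin : a ∉ t := (List.nodup_cons.mp hnd).1
      have hc' : (inv.modify a [] (fun g => g ++ [k])).contains a = true := by
        rw [PySem.Dict.contains_modify]; simp
      rw [ih _ hc' (List.nodup_cons.mp hnd).2, if_neg hnotin,
        PySem.Dict.getD_modify_self]
      simp
    · have hca : c ≠ a := fun h => hac h.symm
      by_cases ha : inv.contains a = true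
      · rw [if_pos ha]
        have hc' : (inv.modify a [] (fun g => g ++ [k])).contains c = true := by
          rw [PySem.Dict.contains_modify]; simp [hc]
        rw [ih _ hc' (List.nodup_cons.mp hnd).2, PySem.Dict.getD_modify, if_neg hca]
        simp [List.mem_cons, hca]
      · rw [if_neg ha, ih _ hc (List.nodup_cons.mp hnd).2]
        simp [List.mem_cons, hca]

-- the whole of B's main loop builds pvGens at every key c
theorem pvB_getD_outer (l : List (Int × List Int)) (c : Int) (inv : PySem.Dict Int (List Int))
    (hc : inv.contains c = true) :
    (l.foldl (fun inv kc =>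
        (PySem.List.dedup kc.2).foldl (fun inv c' =>
          if inv.contains c' then inv.modify c' [] (fun g => g ++ [kc.1]) else inv) inv) inv).getD c []
    = inv.getD c [] ++ (l.filter (fun kc => decide (c ∈ kc.2))).map (fun kc => kc.1) := by
  induction l generalizing inv with
  | nil => simp
  | cons kc t ih =>
    simp only [List.foldl_cons]
    have hc' : ((PySem.List.dedup kc.2).foldl (fun inv c' =>
        if inv.contains c' then inv.modify c' [] (fun g => g ++ [kc.1]) else inv) inv).contains c
        = true := by
      rw [PySem.Dict.contains_eq_decide_mem_keys, pvB_keys_inner,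
        ← PySem.Dict.contains_eq_decide_mem_keys]; exact hc
    have hnd2 : (PySem.List.dedup kc.2).Nodup := PySem.Set.nodup_ofList kc.2
    rw [ih _ hc',
      pvB_getD_inner (PySem.List.dedup kc.2) kc.1 c inv hc hnd2]
    by_cases h : c ∈ kc.2
    · have hdm : c ∈ PySem.List.dedup kc.2 := (PySem.List.mem_dedup kc.2 c).mpr h
      rw [if_pos hdm]
      simp [h, List.append_assoc]
    · have hdm : c ∉ PySem.List.dedup kc.2 := fun hm => h ((PySem.List.mem_dedup kc.2 c).mp hm)
      rw [if_neg hdm]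
      simp [h]

theorem pvB_items (d : List (Int × List Int))
    (hnd : (d.map (fun kv => kv.1)).Nodup) :
    get_dict_generator_alt d = d.map (fun kv => (kv.1, pvGens d kv.1)) := by
  unfold get_dict_generator_alt
  have hmapnd : ((d.map (fun kv => (kv.1, ([] : List Int)))).map (fun p => p.1)).Nodup := by
    simpa [List.map_map, Function.comp] using hnd
  have hitems0 :
      (PySem.Dict.ofList (d.map (fun kv => (kv.1, ([] : List Int))))).items
      = d.map (fun kv => (kv.1, ([] : List Int))) := by
    show (List.foldl (fun acc p => acc.insert p.1 p.2) PySem.Dict.empty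
        (d.map (fun kv => (kv.1, ([] : List Int))))).items = _
    rw [PySem.Dict.items_foldl_insert_fresh (d.map (fun kv => (kv.1, ([] : List Int))))
      (fun p => p.1) (fun p => p.2) PySem.Dict.empty
      (by intro a _; exact PySem.Dict.contains_empty a.1) hmapnd]
    simp [PySem.Dict.empty]
  set inv0 : PySem.Dict Int (List Int) :=
    PySem.Dict.ofList (d.map (fun kv => (kv.1, ([] : List Int)))) with hinv0
  have hkeys0 : inv0.keys = d.map (fun kv => kv.1) := by
    unfold PySem.Dict.keys
    rw [hitems0]; simp [List.map_map, Function.comp]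
  set fin := d.foldl (fun inv kc =>
      (PySem.List.dedup kc.2).foldl (fun inv c =>
        if inv.contains c then inv.modify c [] (fun g => g ++ [kc.1]) else inv) inv) inv0 with hfin
  have hkeys : fin.keys = d.map (fun kv => kv.1) := by rw [hfin, pvB_keys_outer, hkeys0]
  have hknd : fin.keys.Nodup := by rw [hkeys]; exact hnd
  rw [PySem.Dict.items_eq_map_keys fin hknd ([] : List Int), hkeys, List.map_map]
  refine List.map_congr_left ?_
  intro kv hkv
  have hc0 : inv0.contains kv.1 = true := by
    rw [PySem.Dict.contains_eq_decide_mem_keys, hkeys0]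
    exact decide_eq_true (List.mem_map.mpr ⟨kv, hkv, rfl⟩)
  have hg0 : inv0.getD kv.1 [] = [] := by
    have hmem : (kv.1, ([] : List Int)) ∈ inv0.items := by
      rw [hitems0]; exact List.mem_map.mpr ⟨kv, hkv, rfl⟩
    have hk0 : inv0.keys.Nodup := by rw [hkeys0]; exact hnd
    exact PySem.Dict.getD_of_mem_items _ hmem hk0 []
  have hout := pvB_getD_outer d kv.1 inv0 hc0
  simp only [Function.comp_apply]
  rw [hfin, hout, hg0]
  simp [pvGens]

-- ===== VERDICT (by name: the statement is the Claim_ definition above) =====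
theorem get_dict_generator_spec : Claim_equal_get_dict_generator := by
  intro d _ hpre
  unfold Spec_get_dict_generator
  rw [pvA_items d hpre, pvB_items d hpre]
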